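-- pv_equiv track=rewrite | github.com/haka913/programmers | p_2018BLIND_n진수게임.py | solution
-- ===== SOURCE A (Python) =====
-- def baseN(number, base):
--     numeral = ['0', '1', '2', '3', '4', '5', '6', '7', '8', '9', 'A', 'B', 'C', 'D', 'E', 'F']
--     result = ''
--     if number == 0:
--         return '0'
--     while number > 0:
--         result += numeral[number % base]
--         number = number // base
--     return result[::-1]
--
-- def solution(n, t, m, p):
--     tmp = ''
--     answer = ''
--     for i in range(t * m):
--         tmp += baseN(i, n)
--     for i in range(p - 1, t * m, m):
--         answer += tmp[i]
--
--     return answer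
-- ===== SOURCE B (Python) =====
-- def solution(n, t, m, p):
--     # One fused pass: generate the base-n digits of 0..t*m-1 and sample the
--     # p-th player's digits on the fly, without materialising the full string.
--     numeral = '0123456789ABCDEF'
--     total = t * m
--     answer = []
--     pos = 0
--     for i in range(total):
--         digs = [0] if i == 0 else []
--         x = i
--         while x > 0:
--             digs.append(x % n)
--             x //= n
--         digs.reverse()
--         for d in digs:
--             if p - 1 <= pos < total and (pos - (p - 1)) % m == 0:
--                 answer.append(numeral[d])
--             pos += 1
--     return ''.join(answer)
-- ===== Notes on version B (the rewrite author's own statement) =====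
-- stated objective: alternative
-- what changed: B fuses generation and sampling into one pass: it keeps a single running digit position and appends a digit to the answer the moment it is emitted, instead of A's two phases (materialise the full concatenated base-n string, then rescan it with a strided range).
-- outside the precondition, e.g. on solution(2, 2, 2, 0): A returns '110', B returns '10'; on solution(2, -4, -1, 6): A returns '1', B returns ''; on solution(-20, 1, 1, 1): A returns '0', B returns '0'
import Mathlib
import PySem

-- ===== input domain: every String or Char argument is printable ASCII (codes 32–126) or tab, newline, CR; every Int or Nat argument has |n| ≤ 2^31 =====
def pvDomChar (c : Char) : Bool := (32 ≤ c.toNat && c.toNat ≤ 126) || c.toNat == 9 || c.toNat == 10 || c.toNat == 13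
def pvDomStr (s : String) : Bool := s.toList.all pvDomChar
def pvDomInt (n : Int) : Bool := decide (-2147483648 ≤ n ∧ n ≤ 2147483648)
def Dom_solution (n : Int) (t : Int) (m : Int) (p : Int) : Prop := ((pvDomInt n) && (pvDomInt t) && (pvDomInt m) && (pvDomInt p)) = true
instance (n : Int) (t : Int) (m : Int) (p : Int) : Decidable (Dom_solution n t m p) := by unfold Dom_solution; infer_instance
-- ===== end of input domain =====

-- B fuses generation and sampling into a single pass over the numbers (one running
-- digit position, no intermediate full concatenated string); objective: alternative.

-- ===== PORT A =====
-- numeral table of baseN (a list of one-character strings, as in the Python)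
def pvNumeralA : List String :=
  ["0", "1", "2", "3", "4", "5", "6", "7", "8", "9", "A", "B", "C", "D", "E", "F"]

-- the 'while number > 0' loop of baseN; fuel number.toNat suffices on Pre_ (base ≥ 2)
def pvBaseNLoop (base : Int) : Nat → Int → String → String
  | 0, _, result => result
  | fuel + 1, number, result =>
    if 0 < number then
      pvBaseNLoop base fuel (PySem.Int.floordiv number base)
        (result ++ (PySem.List.pyGet? pvNumeralA (PySem.Int.mod number base)).getD "")
        -- none = IndexError, outside Pre_
    else result

def pvBaseN (number : Int) (base : Int) : String :=
  if number = 0 then "0"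
  else (PySem.Str.slice? (pvBaseNLoop base number.toNat number "") none none (-1)).getD ""
       -- result[::-1]

def solution (n : Int) (t : Int) (m : Int) (p : Int) : String :=
  let tmp := (PySem.List.pyRange 0 (t * m) 1).foldl (fun acc i => acc ++ pvBaseN i n) ""
  (PySem.List.pyRange (p - 1) (t * m) m).foldl
    (fun acc i =>
      acc ++ (match PySem.Str.pyGet? tmp i with
              | some c => String.ofList [c]
              | none => ""))   -- none = IndexError, outside Pre_
    ""

-- ===== PORT B =====
def pvNumeralB : String := "0123456789ABCDEF"

-- the 'while x > 0' digit loop of B; fuel i.toNat suffices on Pre_ (n ≥ 2)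
def pvDigitsLoop (n : Int) : Nat → Int → List Int → List Int
  | 0, _, digs => digs
  | fuel + 1, x, digs =>
    if 0 < x then pvDigitsLoop n fuel (PySem.Int.floordiv x n) (digs ++ [PySem.Int.mod x n])
    else digs

def pvDigits (n : Int) (i : Int) : List Int :=
  (pvDigitsLoop n i.toNat i (if i = 0 then [0] else [])).reverse

def solution_alt (n : Int) (t : Int) (m : Int) (p : Int) : String :=
  let total := t * m
  let r := (PySem.List.pyRange 0 total 1).foldl
    (fun (st : Int × List Char) i =>
      (pvDigits n i).foldl
        (fun (st : Int × List Char) d =>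
          (st.1 + 1,
           if p - 1 ≤ st.1 ∧ st.1 < total ∧ PySem.Int.mod (st.1 - (p - 1)) m = 0 then
             st.2 ++ [(PySem.Str.pyGet? pvNumeralB d).getD ' ']  -- none = IndexError, outside Pre_
           else st.2)) st)
    (0, [])
  String.ofList r.2

-- ===== PRECONDITION & SPEC =====
-- Pre_ excludes exactly the inputs where A leaves the intended game: n ∈ {0, 1}
-- (ZeroDivisionError or an infinite loop), and the regions where an index leaves the
-- intended range and A either raises IndexError or silently reads via Python
-- negative-index wraparound, depending on the (non-closed-form) length of the
-- concatenated string: n ≥ 17 with t*m ≥ 17 and n ≤ -18 (digits outside the reach of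
-- the 16-entry numeral table; for n ≤ -18, A can still return '0' when t*m ≤ 1),
-- m ≤ 0 (range step ValueError, or a backwards range reading past position t*m),
-- p ≤ 0 (tmp[p-1] is a negative index). -17 ≤ n ≤ -1 stays inside: there every
-- number emits one digit and both programs wrap the table identically.
-- (second disjunct: t*m ≤ 0 and the sampling range is empty — A touches no digit at
-- all and returns '' for every n, so no condition on n is needed there)
def Pre_solution (n : Int) (t : Int) (m : Int) (p : Int) : Prop :=
  (1 ≤ m ∧ 1 ≤ p ∧ ((2 ≤ n ∧ (n ≤ 16 ∨ t * m ≤ 16)) ∨ (-17 ≤ n ∧ n ≤ -1)))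
    ∨ (t * m ≤ 0 ∧ ((1 ≤ m ∧ t * m ≤ p - 1) ∨ (m ≤ -1 ∧ p - 1 ≤ t * m)))
instance (n : Int) (t : Int) (m : Int) (p : Int) : Decidable (Pre_solution n t m p) := by
  unfold Pre_solution; infer_instance
def pvWitness_solution : Int × Int × Int × Int := (2, 2, 2, 1)

def Spec_solution (n : Int) (t : Int) (m : Int) (p : Int) (out : String) : Prop :=
  out = solution_alt n t m p
instance (n : Int) (t : Int) (m : Int) (p : Int) (out : String) :
    Decidable (Spec_solution n t m p out) := by unfold Spec_solution; infer_instance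

-- ===== CLAIM (what is proved, stated in full; the proofs are below) =====
def Claim_equal_solution : Prop :=
  ∀ (n : Int) (t : Int) (m : Int) (p : Int),
    Dom_solution n t m p → Pre_solution n t m p → Spec_solution n t m p (solution n t m p)

-- ===== LEMMAS AND PROOFS =====

-- the common digit-to-character table
def pvCharOf (d : Nat) : Char :=
  ['0', '1', '2', '3', '4', '5', '6', '7', '8', '9', 'A', 'B', 'C', 'D', 'E', 'F'].getD d ' '

-- the character block contributed by number i (MSB first), base 2 ≤ n
def pvRepPos (n : Int) (i : Int) : List Char :=
  if i = 0 then ['0'] else ((Nat.digits n.toNat i.toNat).map pvCharOf).reverse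

-- for a negative base every number emits exactly one (wrapped) table character
def pvRepNeg (n : Int) (i : Int) : List Char :=
  [(PySem.Str.pyGet? pvNumeralB (PySem.Int.mod i n)).getD ' ']

def pvRep (n : Int) (i : Int) : List Char :=
  if n < 0 then pvRepNeg n i else pvRepPos n i

theorem pvNumA_get (d : Nat) (h : d < 16) :
    PySem.List.pyGet? pvNumeralA (d : Int) = some (String.ofList [pvCharOf d]) := by
  interval_cases d <;> decide

theorem pvNumB_get (d : Nat) (h : d < 16) :
    PySem.Str.pyGet? pvNumeralB (d : Int) = some (pvCharOf d) := by
  interval_cases d <;> decide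

theorem pvLoopA (n : Int) (hn : 2 ≤ n) :
    ∀ (fuel x : Nat), x ≤ fuel → (∀ d ∈ Nat.digits n.toNat x, d < 16) → ∀ (result : String),
      (pvBaseNLoop n fuel (x : Int) result).toList
        = result.toList ++ (Nat.digits n.toNat x).map pvCharOf := by
  intro fuel
  induction fuel with
  | zero =>
    intro x hx hd result
    interval_cases x
    simp [pvBaseNLoop]
  | succ fuel ih =>
    intro x hx hd result
    rcases Nat.eq_zero_or_pos x with h0 | hpos
    · subst h0; simp [pvBaseNLoop]
    · have hb : 1 < n.toNat := by omega
      have hcons : Nat.digits n.toNat x = x % n.toNat :: Nat.digits n.toNat (x / n.toNat) :=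
        Nat.digits_def' hb hpos
      have hnc : ((n.toNat : Int)) = n := Int.toNat_of_nonneg (by omega)
      have hdiv : PySem.Int.floordiv (x : Int) n = ((x / n.toNat : Nat) : Int) := by
        rw [← hnc]; exact PySem.Int.floordiv_natCast x n.toNat
      have hmod : PySem.Int.mod (x : Int) n = ((x % n.toNat : Nat) : Int) := by
        rw [← hnc]; exact PySem.Int.mod_natCast x n.toNat
      have hd' : x % n.toNat < 16 := hd _ (by rw [hcons]; exact List.mem_cons_self)
      have hdt : ∀ d ∈ Nat.digits n.toNat (x / n.toNat), d < 16 := by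
        intro d hdm; exact hd d (by rw [hcons]; exact List.mem_cons_of_mem _ hdm)
      have hfx : x / n.toNat ≤ fuel := by
        have := Nat.div_lt_self hpos hb; omega
      have hlt : (0 : Int) < (x : Int) := by exact_mod_cast hpos
      simp only [pvBaseNLoop, if_pos hlt, hdiv, hmod, pvNumA_get _ hd', Option.getD_some]
      rw [ih _ hfx hdt]
      simp [hcons]

theorem pvBaseN_toList (n : Int) (i : Int) (hn : 2 ≤ n) (hi : 0 ≤ i)
    (hd : ∀ d ∈ Nat.digits n.toNat i.toNat, d < 16) :
    (pvBaseN i n).toList = pvRepPos n i := by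
  rcases eq_or_ne i 0 with h0 | h0
  · subst h0; simp [pvBaseN, pvRepPos]
  · have hic : ((i.toNat : Int)) = i := Int.toNat_of_nonneg hi
    rw [pvBaseN, if_neg h0, pvRepPos, if_neg h0]
    rw [PySem.Str.slice?_none_none_neg_one, Option.getD_some]
    have := pvLoopA n hn i.toNat i.toNat le_rfl hd ""
    rw [hic] at this
    simp [this]

theorem pvLoopB (n : Int) (hn : 2 ≤ n) :
    ∀ (fuel x : Nat), x ≤ fuel → ∀ (digs : List Int),
      pvDigitsLoop n fuel (x : Int) digs
        = digs ++ (Nat.digits n.toNat x).map (fun d => Int.ofNat d) := by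
  intro fuel
  induction fuel with
  | zero =>
    intro x hx digs
    interval_cases x
    simp [pvDigitsLoop]
  | succ fuel ih =>
    intro x hx digs
    rcases Nat.eq_zero_or_pos x with h0 | hpos
    · subst h0; simp [pvDigitsLoop]
    · have hb : 1 < n.toNat := by omega
      have hcons : Nat.digits n.toNat x = x % n.toNat :: Nat.digits n.toNat (x / n.toNat) :=
        Nat.digits_def' hb hpos
      have hnc : ((n.toNat : Int)) = n := Int.toNat_of_nonneg (by omega)
      have hdiv : PySem.Int.floordiv (x : Int) n = ((x / n.toNat : Nat) : Int) := by
        rw [← hnc]; exact PySem.Int.floordiv_natCast x n.toNat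
      have hmod : PySem.Int.mod (x : Int) n = ((x % n.toNat : Nat) : Int) := by
        rw [← hnc]; exact PySem.Int.mod_natCast x n.toNat
      have hlt : (0 : Int) < (x : Int) := by exact_mod_cast hpos
      have hfx : x / n.toNat ≤ fuel := by
        have := Nat.div_lt_self hpos hb; omega
      simp only [pvDigitsLoop, if_pos hlt, hdiv, hmod]
      rw [ih _ hfx]
      simp [hcons]

theorem pvDigits_map (n : Int) (i : Int) (hn : 2 ≤ n) (hi : 0 ≤ i)
    (hd : ∀ d ∈ Nat.digits n.toNat i.toNat, d < 16) :
    (pvDigits n i).map (fun d => (PySem.Str.pyGet? pvNumeralB d).getD ' ') = pvRepPos n i := by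
  have hic : ((i.toNat : Int)) = i := Int.toNat_of_nonneg hi
  rcases eq_or_ne i 0 with h0 | h0
  · subst h0
    have h1 : pvDigits n 0 = [0] := by simp [pvDigits, pvDigitsLoop]
    rw [h1, pvRepPos, if_pos rfl]
    decide
  · have := pvLoopB n hn i.toNat i.toNat le_rfl []
    rw [hic] at this
    rw [pvDigits, if_neg h0, this, pvRepPos, if_neg h0]
    simp only [List.nil_append, List.map_reverse, List.map_map]
    congr 1
    apply List.map_congr_left
    intro d hdm
    have : d < 16 := hd d hdm
    simpa using congrArg (Option.getD · ' ') (pvNumB_get d this)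

-- folding "acc += f(i)" over strings, on the character level
theorem pvStrFold (l : List Int) (f : Int → String) (init : String) :
    (l.foldl (fun acc i => acc ++ f i) init).toList
      = init.toList ++ l.flatMap (fun i => (f i).toList) := by
  induction l generalizing init with
  | nil => simp
  | cons x xs ih => simp [ih, String.toList_append]

theorem pvFlatMapCongr {α β : Type} (l : List α) (f g : α → List β)
    (h : ∀ x ∈ l, f x = g x) : l.flatMap f = l.flatMap g := by
  induction l with
  | nil => rfl
  | cons x xs ih =>
    simp only [List.flatMap_cons]
    rw [h x List.mem_cons_self, ih (fun y hy => h y (List.mem_cons_of_mem _ hy))]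

theorem pvLenFlatMap {α β : Type} (l : List α) (g : α → List β)
    (h : ∀ x ∈ l, 1 ≤ (g x).length) : l.length ≤ (l.flatMap g).length := by
  induction l with
  | nil => simp
  | cons x xs ih =>
    simp only [List.flatMap_cons, List.length_append, List.length_cons]
    have := h x List.mem_cons_self
    have := ih (fun y hy => h y (List.mem_cons_of_mem _ hy))
    omega

-- the B-side selection of one character block, starting at global position pos
def pvSel (N pm1 mm : Int) : Int → List Char → List Char
  | _, [] => []
  | pos, c :: cs =>
    (if pm1 ≤ pos ∧ pos < N ∧ PySem.Int.mod (pos - pm1) mm = 0 then [c] else [])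
      ++ pvSel N pm1 mm (pos + 1) cs

theorem pvFoldF (N pm1 mm : Int) :
    ∀ (cs : List Char) (st : Int × List Char),
      cs.foldl (fun (st : Int × List Char) c =>
          (st.1 + 1,
           if pm1 ≤ st.1 ∧ st.1 < N ∧ PySem.Int.mod (st.1 - pm1) mm = 0 then st.2 ++ [c]
           else st.2)) st
        = (st.1 + cs.length, st.2 ++ pvSel N pm1 mm st.1 cs) := by
  intro cs
  induction cs with
  | nil => intro st; simp [pvSel]
  | cons c cs ih =>
    intro st
    simp only [List.foldl_cons, ih, pvSel, List.length_cons, Prod.mk.injEq]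
    refine ⟨by push_cast; ring, by split <;> simp⟩

-- sorted filter split: peel off k from the ≥-filter of a strictly increasing list
theorem pvFilterSplit (l : List Int) (hl : l.Pairwise (· < ·)) (k : Int) :
    l.filter (fun j => decide (k ≤ j))
      = (if k ∈ l then [k] else []) ++ l.filter (fun j => decide (k + 1 ≤ j)) := by
  induction l with
  | nil => simp
  | cons a l ih =>
    have hrest : ∀ b ∈ l, a < b := fun b hb => (List.pairwise_cons.1 hl).1 b hb
    have ihl := ih (List.pairwise_cons.1 hl).2
    simp only [List.filter_cons, decide_eq_true_eq]
    rcases lt_trichotomy a k with hak | hak | hak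
    · -- a < k : a is dropped on both sides, membership unchanged
      rw [if_neg (show ¬ k ≤ a by omega), if_neg (show ¬ k + 1 ≤ a by omega), ihl]
      congr 1
      by_cases hkl : k ∈ l
      · rw [if_pos hkl, if_pos (List.mem_cons_of_mem _ hkl)]
      · rw [if_neg hkl, if_neg (fun hc => by
          rcases List.mem_cons.1 hc with rfl | h
          · omega
          · exact hkl h)]
    · -- a = k : a is kept on the left, is the peeled head on the right
      subst hak
      rw [if_pos (show a ≤ a from le_rfl), if_neg (show ¬ a + 1 ≤ a by omega),
        if_pos List.mem_cons_self]
      have hflt : l.filter (fun j => decide (a ≤ j)) = l.filter (fun j => decide (a + 1 ≤ j)) :=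
        List.filter_congr (fun b hb => by
          have := hrest b hb; simp only [decide_eq_decide]; omega)
      simp [hflt]
    · -- k < a : a is kept on both sides, k is not a member
      rw [if_pos (show k ≤ a by omega), if_pos (show k + 1 ≤ a by omega), if_neg (fun hc => by
        rcases List.mem_cons.1 hc with rfl | h
        · omega
        · have := hrest k h; omega)]
      have hflt : l.filter (fun j => decide (k ≤ j)) = l.filter (fun j => decide (k + 1 ≤ j)) :=
        List.filter_congr (fun b hb => by
          have := hrest b hb; simp only [decide_eq_decide]; omega)
      simp [hflt]

theorem pvPairwiseIdxs (pm1 N mm : Int) (hm : 0 < mm) :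
    (PySem.List.pyRange pm1 N mm).Pairwise (· < ·) := by
  rw [PySem.List.pyRange_of_pos _ _ hm]
  exact List.Pairwise.map _ (fun a b hab => by nlinarith) List.pairwise_lt_range

-- the core: the fused selection over the suffix S.drop k is the tail of the strided sample
theorem pvCore (S : List Char) (N pm1 mm : Int) (hm : 0 < mm) (hp : 0 ≤ pm1)
    (hNS : N.toNat ≤ S.length) :
    ∀ (d k : Nat), k + d = S.length →
      pvSel N pm1 mm (k : Int) (S.drop k)
        = ((PySem.List.pyRange pm1 N mm).filter (fun j => decide ((k : Int) ≤ j))).map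
            (fun j => S.getD j.toNat ' ') := by
  intro d
  induction d with
  | zero =>
    intro k hk
    have hdrop : S.drop k = [] := by rw [List.drop_eq_nil_iff]; omega
    rw [hdrop]
    have : (PySem.List.pyRange pm1 N mm).filter (fun j => decide ((k : Int) ≤ j)) = [] := by
      rw [List.filter_eq_nil_iff]
      intro j hj
      have := (PySem.List.mem_pyRange_iff_of_pos hm j).1 hj
      simp only [decide_eq_true_eq]
      omega
    rw [this]
    rfl
  | succ d ih =>
    intro k hk
    have hkS : k < S.length := by omega
    rw [List.drop_eq_getElem_cons hkS]
    show (if pm1 ≤ (k : Int) ∧ (k : Int) < N ∧ PySem.Int.mod ((k : Int) - pm1) mm = 0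
          then [S[k]] else []) ++ pvSel N pm1 mm ((k : Int) + 1) (S.drop (k + 1)) = _
    have hcast : ((k : Int) + 1) = ((k + 1 : Nat) : Int) := by push_cast; ring
    rw [hcast, ih (k + 1) (by omega)]
    rw [pvFilterSplit _ (pvPairwiseIdxs pm1 N mm hm) (k : Int), List.map_append]
    congr 1
    have hmem : ((k : Int) ∈ PySem.List.pyRange pm1 N mm)
        ↔ (pm1 ≤ (k : Int) ∧ (k : Int) < N ∧ PySem.Int.mod ((k : Int) - pm1) mm = 0) := by
      rw [PySem.List.mem_pyRange_iff_of_pos hm, PySem.Int.mod_eq_zero_iff_dvd]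
    by_cases h : pm1 ≤ (k : Int) ∧ (k : Int) < N ∧ PySem.Int.mod ((k : Int) - pm1) mm = 0
    · rw [if_pos h, if_pos (hmem.2 h)]
      simp only [List.map_cons, List.map_nil, Int.toNat_natCast]
      rw [List.getD_eq_getElem _ _ hkS]
    · rw [if_neg h, if_neg (fun hc => h (hmem.1 hc))]
      rfl

-- per-number digit bound, from the Pre_ disjunction
theorem pvDigBound (n N i : Int) (hn : 2 ≤ n) (hsm : n ≤ 16 ∨ N ≤ 16)
    (hiN : i < N) :
    ∀ d ∈ Nat.digits n.toNat i.toNat, d < 16 := by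
  intro d hd
  have hb : 1 < n.toNat := by omega
  by_cases hn16 : n ≤ 16
  · have := Nat.digits_lt_base hb hd
    omega
  · have h16 : N ≤ 16 := hsm.resolve_left hn16
    rcases Nat.eq_zero_or_pos i.toNat with h0 | hpos
    · rw [h0, Nat.digits_zero] at hd
      exact absurd hd (List.not_mem_nil)
    · have hiL : i.toNat < n.toNat := by omega
      rw [Nat.digits_def' hb hpos, Nat.mod_eq_of_lt hiL, Nat.div_eq_of_lt hiL] at hd
      simp only [Nat.digits_zero] at hd
      rcases List.mem_singleton.1 hd with rfl
      omega

theorem pvRep_ne_nil (n i : Int) (hi : 0 ≤ i) : 1 ≤ (pvRep n i).length := by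
  rw [pvRep]
  split
  · simp [pvRepNeg]
  rw [pvRepPos]
  rcases eq_or_ne i 0 with h0 | h0
  · subst h0; simp
  · rw [if_neg h0]
    have : Nat.digits n.toNat i.toNat ≠ [] :=
      Nat.digits_ne_nil_iff_ne_zero.2 (by omega)
    simp only [List.length_reverse, List.length_map]
    exact Nat.one_le_iff_ne_zero.2 (fun hc => this (List.length_eq_zero_iff.1 hc))

theorem pvTables (d : Int) (h1 : -16 ≤ d) (h2 : d ≤ 0) :
    PySem.List.pyGet? pvNumeralA d
      = some (String.ofList [(PySem.Str.pyGet? pvNumeralB d).getD ' ']) := by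
  interval_cases d <;> decide

theorem pvFloordivNeg (i n : Int) (hi : 0 < i) (hn : n ≤ -1) :
    PySem.Int.floordiv i n < 0 := by
  have h := PySem.Int.floordiv_mul_add_mod i n
  have hb := PySem.Int.mod_neg_bounds (a := i) (b := n) (by omega)
  by_contra hc
  push_neg at hc
  have : PySem.Int.floordiv i n * n ≤ 0 :=
    mul_nonpos_of_nonneg_of_nonpos hc (by omega)
  linarith [hb.2]

theorem pvBaseN_neg (n i : Int) (hn1 : -17 ≤ n) (hn2 : n ≤ -1) (hi : 0 ≤ i) :
    (pvBaseN i n).toList = pvRepNeg n i := by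
  have hmod0 : PySem.Int.mod (0 : Int) n = 0 := (PySem.Int.mod_eq_zero_iff_dvd 0 n).2 (dvd_zero n)
  rcases eq_or_ne i 0 with h0 | h0
  · subst h0
    rw [pvBaseN, if_pos rfl, pvRepNeg, hmod0]
    decide
  · have hipos : 0 < i := lt_of_le_of_ne hi (Ne.symm h0)
    have hb := PySem.Int.mod_neg_bounds (a := i) (b := n) (by omega)
    have hfd := pvFloordivNeg i n hipos hn2
    obtain ⟨fuel, hfuel⟩ : ∃ k, i.toNat = k + 1 := ⟨i.toNat - 1, by omega⟩
    have hstep : pvBaseNLoop n (fuel + 1) i ""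
        = "" ++ (PySem.List.pyGet? pvNumeralA (PySem.Int.mod i n)).getD "" := by
      cases fuel with
      | zero => simp only [pvBaseNLoop, if_pos hipos]
      | succ f =>
        simp only [pvBaseNLoop, if_pos hipos,
          if_neg (show ¬ (0 : Int) < PySem.Int.floordiv i n by omega)]
    rw [pvBaseN, if_neg h0, hfuel, hstep, pvTables _ (by omega) (by omega), Option.getD_some,
      PySem.Str.slice?_none_none_neg_one, Option.getD_some, pvRepNeg]
    simp [String.toList_append]

theorem pvDigits_neg (n i : Int) (hn2 : n ≤ -1) (hi : 0 ≤ i) :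
    (pvDigits n i).map (fun d => (PySem.Str.pyGet? pvNumeralB d).getD ' ') = pvRepNeg n i := by
  have hmod0 : PySem.Int.mod (0 : Int) n = 0 := (PySem.Int.mod_eq_zero_iff_dvd 0 n).2 (dvd_zero n)
  rcases eq_or_ne i 0 with h0 | h0
  · subst h0
    have h1 : pvDigits n 0 = [0] := by simp [pvDigits, pvDigitsLoop]
    rw [h1, pvRepNeg, hmod0]
    simp
  · have hipos : 0 < i := lt_of_le_of_ne hi (Ne.symm h0)
    have hfd := pvFloordivNeg i n hipos hn2
    obtain ⟨fuel, hfuel⟩ : ∃ k, i.toNat = k + 1 := ⟨i.toNat - 1, by omega⟩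
    have hstep : pvDigitsLoop n (fuel + 1) i [] = [PySem.Int.mod i n] := by
      cases fuel with
      | zero => simp [pvDigitsLoop, if_pos hipos]
      | succ f =>
        simp only [pvDigitsLoop, if_pos hipos,
          if_neg (show ¬ (0 : Int) < PySem.Int.floordiv i n by omega), List.nil_append]
    rw [pvDigits, if_neg h0, hfuel, hstep, pvRepNeg]
    simp

-- ===== VERDICT (by name: the statement is the Claim_ definition above) =====
theorem solution_spec : Claim_equal_solution := by
  intro n t m p _ hpre
  rcases hpre with ⟨hm, hp, hbr⟩ | ⟨hN0, hdeg⟩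
  case inr =>
    -- degenerate region: both ranges are empty and both programs return ''
    have hr0 : PySem.List.pyRange 0 (t * m) 1 = [] := PySem.List.pyRange_one_eq_nil (by omega)
    have hrs : PySem.List.pyRange (p - 1) (t * m) m = [] := by
      rcases hdeg with ⟨hm1, hpN⟩ | ⟨hm1, hpN⟩
      · rw [PySem.List.pyRange_of_pos _ _ (show (0 : Int) < m by omega),
          if_neg (show ¬ p - 1 < t * m by omega)]
        simp
      · simp only [PySem.List.pyRange]
        rw [if_neg (show m ≠ 0 by omega)]
        rw [if_neg (show ¬ (0 : Int) < m by omega), if_neg (show ¬ t * m < p - 1 by omega)]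
        simp
    unfold Spec_solution
    simp [solution, solution_alt, hr0, hrs]
  case inl =>
    unfold Spec_solution
    set N := t * m with hN
    have hrepA : ∀ i, 0 ≤ i → i < N → (pvBaseN i n).toList = pvRep n i := by
      intro i h0i h1i
      rcases hbr with ⟨hn2, hsm⟩ | ⟨hgn, hln⟩
      · rw [pvRep, if_neg (by omega)]
        exact pvBaseN_toList n i hn2 h0i (pvDigBound n N i hn2 hsm h1i)
      · rw [pvRep, if_pos (by omega)]
        exact pvBaseN_neg n i hgn hln h0i
    have hrepB : ∀ i, 0 ≤ i → i < N →
        (pvDigits n i).map (fun d => (PySem.Str.pyGet? pvNumeralB d).getD ' ') = pvRep n i := by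
      intro i h0i h1i
      rcases hbr with ⟨hn2, hsm⟩ | ⟨hgn, hln⟩
      · rw [pvRep, if_neg (by omega)]
        exact pvDigits_map n i hn2 h0i (pvDigBound n N i hn2 hsm h1i)
      · rw [pvRep, if_pos (by omega)]
        exact pvDigits_neg n i hln h0i
    -- the concatenated digit stream
    set S : List Char := (PySem.List.pyRange 0 N 1).flatMap (pvRep n) with hS
    have hmemN : ∀ i ∈ PySem.List.pyRange 0 N 1, 0 ≤ i ∧ i < N := by
      intro i hi
      exact (PySem.List.mem_pyRange_one).1 hi
    -- length of the stream
    have hNS : N.toNat ≤ S.length := by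
      have := pvLenFlatMap (PySem.List.pyRange 0 N 1) (pvRep n)
        (fun i hi => pvRep_ne_nil n i (hmemN i hi).1)
      rw [PySem.List.length_pyRange_one, ← hS] at this
      omega
    -- A's tmp equals the stream
    have htmp : ((PySem.List.pyRange 0 N 1).foldl (fun acc i => acc ++ pvBaseN i n) "").toList
        = S := by
      rw [pvStrFold]
      rw [hS]
      exact pvFlatMapCongr _ _ _ (fun i hi => hrepA i (hmemN i hi).1 (hmemN i hi).2)
    -- indexing the stream
    have hget : ∀ i ∈ PySem.List.pyRange (p - 1) N m,
        PySem.Str.pyGet?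
          ((PySem.List.pyRange 0 N 1).foldl (fun acc i => acc ++ pvBaseN i n) "") i
          = some (S.getD i.toNat ' ') := by
      intro i hi
      have hmem := (PySem.List.mem_pyRange_iff_of_pos (by omega) i).1 hi
      have hi0 : 0 ≤ i := by omega
      have hic : ((i.toNat : Int)) = i := Int.toNat_of_nonneg hi0
      have hlen : i.toNat < S.length := by omega
      rw [← hic, PySem.Str.pyGet?_natCast, htmp, List.getElem?_eq_getElem hlen]
      simp only [Int.toNat_natCast]
      rw [List.getD_eq_getElem _ _ hlen]
    -- A's output, characterwise
    have hA : (solution n t m p).toList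
        = (PySem.List.pyRange (p - 1) N m).map (fun j => S.getD j.toNat ' ') := by
      simp only [solution, ← hN]
      rw [pvStrFold]
      have : (PySem.List.pyRange (p - 1) N m).flatMap
          (fun i => ((match PySem.Str.pyGet?
              ((PySem.List.pyRange 0 N 1).foldl (fun acc i => acc ++ pvBaseN i n) "") i with
            | some c => String.ofList [c]
            | none => "") : String).toList)
          = (PySem.List.pyRange (p - 1) N m).flatMap (fun j => [S.getD j.toNat ' ']) := by
        apply pvFlatMapCongr
        intro i hi
        rw [hget i hi]
        simp
      rw [this, ← List.map_eq_flatMap]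
      simp
    -- B's output, characterwise
    have hB : (solution_alt n t m p).toList = pvSel N (p - 1) m 0 S := by
      simp only [solution_alt, ← hN]
      have hinner : ∀ i ∈ PySem.List.pyRange 0 N 1, ∀ st : Int × List Char,
          (pvDigits n i).foldl
            (fun (st : Int × List Char) d =>
              (st.1 + 1,
               if p - 1 ≤ st.1 ∧ st.1 < N ∧ PySem.Int.mod (st.1 - (p - 1)) m = 0 then
                 st.2 ++ [(PySem.Str.pyGet? pvNumeralB d).getD ' ']
               else st.2)) st
            = (pvRep n i).foldl
              (fun (st : Int × List Char) c =>
                (st.1 + 1,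
                 if p - 1 ≤ st.1 ∧ st.1 < N ∧ PySem.Int.mod (st.1 - (p - 1)) m = 0 then st.2 ++ [c]
                 else st.2)) st := by
        intro i hi st
        rw [← hrepB i (hmemN i hi).1 (hmemN i hi).2]
        rw [List.foldl_map]
      rw [PySem.List.foldl_congr_mem _ _
        (fun (st : Int × List Char) i =>
          (pvRep n i).foldl
            (fun (st : Int × List Char) c =>
              (st.1 + 1,
               if p - 1 ≤ st.1 ∧ st.1 < N ∧ PySem.Int.mod (st.1 - (p - 1)) m = 0 then st.2 ++ [c]
               else st.2)) st)
        _ (fun st i hi => hinner i hi st)]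
      rw [← List.foldl_flatMap, ← hS, pvFoldF]
      simp
    -- both are the strided sample
    apply String.ext
    show (solution n t m p).toList = (solution_alt n t m p).toList
    rw [hA, hB]
    have := pvCore S N (p - 1) m (by omega) (by omega) hNS S.length 0 (by omega)
    simp only [Nat.cast_zero, List.drop_zero] at this
    rw [this]
    have : (PySem.List.pyRange (p - 1) N m).filter (fun j => decide ((0 : Int) ≤ j))
        = PySem.List.pyRange (p - 1) N m := by
      rw [List.filter_eq_self]
      intro j hj
      have := (PySem.List.mem_pyRange_iff_of_pos (by omega) j).1 hj
      simp only [decide_eq_true_eq]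
      omega
    rw [this]
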